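-- pv_equiv track=rewrite | github.com/ahostbr/ShadowsAndShurikens | DevTools/python/devtools_status_dashboard.py | format_dashboard
-- ===== SOURCE A (Python) =====
-- def format_dashboard(data: dict):
--     lines = []
--     lines.append("DEVTOOLS STATUS DASHBOARD")
--     lines.append("-" * 72)
--     if not data:
--         lines.append("No status data yet. Use --mode update to add entries.")
--         return lines
--     for plugin, steps in sorted(data.items()):
--         total = len(steps)
--         done = sum(1 for s in steps.values() if s == "done")
--         in_progress = sum(1 for s in steps.values() if s == "in_progress")
--         todo = sum(1 for s in steps.values() if s == "todo")
--         lines.append(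
--             f"{plugin}: done={done}, in_progress={in_progress}, todo={todo}, total={total}"
--         )
--         for step, status in sorted(steps.items()):
--             lines.append(f"  - {step}: {status}")
--         lines.append("")
--     return lines
-- ===== SOURCE B (Python) =====
-- def format_dashboard(data: dict):
--     header = ["DEVTOOLS STATUS DASHBOARD", "-" * 72]
--     if not data:
--         return header + ["No status data yet. Use --mode update to add entries."]
--     return header + [line
--                      for plugin, steps in sorted(data.items())
--                      for line in _plugin_block(plugin, steps)]
--
--
-- def _plugin_block(plugin, steps):
--     done = in_progress = todo = 0
--     body = []
--     for step, status in sorted(steps.items()):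
--         body.append(f"  - {step}: {status}")
--         if status == "done":
--             done += 1
--         elif status == "in_progress":
--             in_progress += 1
--         elif status == "todo":
--             todo += 1
--     return [f"{plugin}: done={done}, in_progress={in_progress}, todo={todo}, total={len(steps)}"] + body + [""]
-- ===== Notes on version B (the rewrite author's own statement) =====
-- stated objective: alternative
-- what changed: Instead of A's imperative accumulation of one flat list with three extra counting scans over steps.values() per plugin, B builds each plugin's block with a helper that tallies done/in_progress/todo in the SAME single pass that emits the sorted step lines (an if/elif chain fused into the emission loop), and the result is the header concatenated with the flattened blocks.
import Mathlib
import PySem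

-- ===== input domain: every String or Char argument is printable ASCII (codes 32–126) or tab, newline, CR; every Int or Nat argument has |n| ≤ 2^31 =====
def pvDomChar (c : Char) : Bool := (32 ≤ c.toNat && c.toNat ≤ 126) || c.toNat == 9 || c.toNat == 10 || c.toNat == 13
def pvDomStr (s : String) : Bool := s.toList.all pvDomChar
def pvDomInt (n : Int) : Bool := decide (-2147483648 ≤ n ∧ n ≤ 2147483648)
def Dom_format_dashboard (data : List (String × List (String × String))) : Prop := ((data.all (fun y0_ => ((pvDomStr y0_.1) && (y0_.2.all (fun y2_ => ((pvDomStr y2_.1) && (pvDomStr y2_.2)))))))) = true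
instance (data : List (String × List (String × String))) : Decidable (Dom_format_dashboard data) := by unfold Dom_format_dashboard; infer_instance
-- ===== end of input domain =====

-- B builds each plugin's block with one fused pass that lists the sorted steps and tallies the
-- three statuses at the same time, then concatenates header ++ flattened blocks (alternative decomposition; same return value).

-- ===== PORT A =====
-- "-" * 72
def pvDash : String := String.ofList (List.replicate 72 '-')

def format_dashboard (data : List (String × List (String × String))) : List String :=
  let lines : List String := ["DEVTOOLS STATUS DASHBOARD", pvDash]
  if data = [] then
    lines ++ ["No status data yet. Use --mode update to add entries."]
  else
    (PySem.List.sorted data (fun p => p.1) false).foldl (fun lines pr =>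
      let plugin := pr.1
      let steps := pr.2
      let vals := steps.map (fun q => q.2)
      let total : Int := (steps.length : Int)
      let done : Int := vals.foldl (fun acc s => if s == "done" then acc + 1 else acc) 0
      let in_progress : Int := vals.foldl (fun acc s => if s == "in_progress" then acc + 1 else acc) 0
      let todo : Int := vals.foldl (fun acc s => if s == "todo" then acc + 1 else acc) 0
      let lines := lines ++ [plugin ++ ": done=" ++ PySem.Int.toStr done ++
        ", in_progress=" ++ PySem.Int.toStr in_progress ++ ", todo=" ++ PySem.Int.toStr todo ++
        ", total=" ++ PySem.Int.toStr total]
      let lines := (PySem.List.sorted steps (fun q => q.1) false).foldl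
        (fun lines q => lines ++ ["  - " ++ q.1 ++ ": " ++ q.2]) lines
      lines ++ [""]) lines

-- ===== PORT B =====
-- _plugin_block: ONE pass over sorted(steps.items()) emits the body lines and tallies the statuses.
def pvPluginBlock (plugin : String) (steps : List (String × String)) : List String :=
  let st := (PySem.List.sorted steps (fun q => q.1) false).foldl
    (fun (acc : Int × Int × Int × List String) q =>
      let body := acc.2.2.2 ++ ["  - " ++ q.1 ++ ": " ++ q.2]
      if q.2 == "done" then (acc.1 + 1, acc.2.1, acc.2.2.1, body)
      else if q.2 == "in_progress" then (acc.1, acc.2.1 + 1, acc.2.2.1, body)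
      else if q.2 == "todo" then (acc.1, acc.2.1, acc.2.2.1 + 1, body)
      else (acc.1, acc.2.1, acc.2.2.1, body))
    ((0 : Int), (0 : Int), (0 : Int), ([] : List String))
  [plugin ++ ": done=" ++ PySem.Int.toStr st.1 ++ ", in_progress=" ++ PySem.Int.toStr st.2.1 ++
   ", todo=" ++ PySem.Int.toStr st.2.2.1 ++ ", total=" ++ PySem.Int.toStr ((steps.length : Int))]
  ++ st.2.2.2 ++ [""]

def format_dashboard_alt (data : List (String × List (String × String))) : List String :=
  let header : List String := ["DEVTOOLS STATUS DASHBOARD", pvDash]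
  if data = [] then
    header ++ ["No status data yet. Use --mode update to add entries."]
  else
    header ++ (PySem.List.sorted data (fun p => p.1) false).flatMap (fun pr => pvPluginBlock pr.1 pr.2)

-- ===== PRECONDITION & SPEC =====
def Spec_format_dashboard (data : List (String × List (String × String))) (out : List String) : Prop := out = format_dashboard_alt data
instance (data : List (String × List (String × String))) (out : List String) : Decidable (Spec_format_dashboard data out) := by unfold Spec_format_dashboard; infer_instance

-- ===== CLAIM =====
def Claim_equal_format_dashboard : Prop := ∀ (data : List (String × List (String × String))), Dom_format_dashboard data → Spec_format_dashboard data (format_dashboard data)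

-- ===== LEMMAS AND PROOFS =====
-- B's fused tally-and-emit fold, characterised: counts are countP's, body is the map of line strings.
theorem pvFused_fold (l : List (String × String)) (d ip td : Int) (body : List String) :
    l.foldl (fun (acc : Int × Int × Int × List String) q =>
      let body := acc.2.2.2 ++ ["  - " ++ q.1 ++ ": " ++ q.2]
      if q.2 == "done" then (acc.1 + 1, acc.2.1, acc.2.2.1, body)
      else if q.2 == "in_progress" then (acc.1, acc.2.1 + 1, acc.2.2.1, body)
      else if q.2 == "todo" then (acc.1, acc.2.1, acc.2.2.1 + 1, body)
      else (acc.1, acc.2.1, acc.2.2.1, body)) (d, ip, td, body)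
    = (d + (l.countP (fun q => q.2 == "done") : Int),
       ip + (l.countP (fun q => q.2 == "in_progress") : Int),
       td + (l.countP (fun q => q.2 == "todo") : Int),
       body ++ l.map (fun q => "  - " ++ q.1 ++ ": " ++ q.2)) := by
  induction l generalizing d ip td body with
  | nil => simp
  | cons q t ih =>
    simp only [List.foldl_cons, List.countP_cons, List.map_cons]
    by_cases h1 : q.2 == "done"
    · have e1 : q.2 = "done" := by simpa using h1
      have h2 : (q.2 == "in_progress") = false := by simp [e1]
      have h3 : (q.2 == "todo") = false := by simp [e1]
      simp only [h1, h2, h3, if_true, Bool.false_eq_true, if_false]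
      rw [ih]
      simp only [Prod.mk.injEq]
      refine ⟨by push_cast; ring, by push_cast; ring, by push_cast; ring, by simp⟩
    · by_cases h2 : q.2 == "in_progress"
      · have h1' : (q.2 == "done") = false := by simpa using h1
        have h3 : (q.2 == "todo") = false := by
          have e2 : q.2 = "in_progress" := by simpa using h2
          simp [e2]
        simp only [h1', h2, h3, if_true, Bool.false_eq_true, if_false]
        rw [ih]
        simp only [Prod.mk.injEq]
        refine ⟨by push_cast; ring, by push_cast; ring, by push_cast; ring, by simp⟩
      · by_cases h3 : q.2 == "todo"
        · have h1' : (q.2 == "done") = false := by simpa using h1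
          have h2' : (q.2 == "in_progress") = false := by simpa using h2
          simp only [h1', h2', h3, if_true, Bool.false_eq_true, if_false]
          rw [ih]
          simp only [Prod.mk.injEq]
          refine ⟨by push_cast; ring, by push_cast; ring, by push_cast; ring, by simp⟩
        · have h1' : (q.2 == "done") = false := by simpa using h1
          have h2' : (q.2 == "in_progress") = false := by simpa using h2
          have h3' : (q.2 == "todo") = false := by simpa using h3
          simp only [h1', h2', h3', Bool.false_eq_true, if_false]
          rw [ih]
          simp only [Prod.mk.injEq]
          refine ⟨by push_cast; ring, by push_cast; ring, by push_cast; ring, by simp⟩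

-- A's per-plugin body appends exactly B's plugin block.
theorem pvA_body (lines : List String) (pr : String × List (String × String)) :
    (let plugin := pr.1
     let steps := pr.2
     let vals := steps.map (fun q => q.2)
     let total : Int := (steps.length : Int)
     let done : Int := vals.foldl (fun acc s => if s == "done" then acc + 1 else acc) 0
     let in_progress : Int := vals.foldl (fun acc s => if s == "in_progress" then acc + 1 else acc) 0
     let todo : Int := vals.foldl (fun acc s => if s == "todo" then acc + 1 else acc) 0
     let lines := lines ++ [plugin ++ ": done=" ++ PySem.Int.toStr done ++
       ", in_progress=" ++ PySem.Int.toStr in_progress ++ ", todo=" ++ PySem.Int.toStr todo ++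
       ", total=" ++ PySem.Int.toStr total]
     let lines := (PySem.List.sorted steps (fun q => q.1) false).foldl
       (fun lines q => lines ++ ["  - " ++ q.1 ++ ": " ++ q.2]) lines
     lines ++ [""])
    = lines ++ pvPluginBlock pr.1 pr.2 := by
  simp only [pvPluginBlock, pvFused_fold, PySem.List.foldl_append_singleton_eq_map,
    PySem.List.foldl_count_if, List.countP_map, zero_add]
  have hperm := PySem.List.sorted_perm pr.2 (fun q => q.1) false
  rw [hperm.countP_eq (fun q => q.2 == "done"),
      hperm.countP_eq (fun q => q.2 == "in_progress"),
      hperm.countP_eq (fun q => q.2 == "todo")]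
  simp [Function.comp_def, List.append_assoc]

-- ===== VERDICT =====
theorem format_dashboard_spec : Claim_equal_format_dashboard := by
  intro data _
  unfold Spec_format_dashboard format_dashboard format_dashboard_alt
  by_cases h : data = []
  · simp [h]
  · simp only [if_neg h]
    rw [show (fun (lines : List String) (pr : String × List (String × String)) =>
      let plugin := pr.1
      let steps := pr.2
      let vals := steps.map (fun q => q.2)
      let total : Int := (steps.length : Int)
      let done : Int := vals.foldl (fun acc s => if s == "done" then acc + 1 else acc) 0
      let in_progress : Int := vals.foldl (fun acc s => if s == "in_progress" then acc + 1 else acc) 0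
      let todo : Int := vals.foldl (fun acc s => if s == "todo" then acc + 1 else acc) 0
      let lines := lines ++ [plugin ++ ": done=" ++ PySem.Int.toStr done ++
        ", in_progress=" ++ PySem.Int.toStr in_progress ++ ", todo=" ++ PySem.Int.toStr todo ++
        ", total=" ++ PySem.Int.toStr total]
      let lines := (PySem.List.sorted steps (fun q => q.1) false).foldl
        (fun lines q => lines ++ ["  - " ++ q.1 ++ ": " ++ q.2]) lines
      lines ++ [""])
      = fun lines pr => lines ++ pvPluginBlock pr.1 pr.2
      from funext fun l => funext fun pr => pvA_body l pr]
    rw [PySem.List.foldl_append_eq_flatMap]
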